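-- pv_equiv track=rewrite | github.com/jparker2006/AdmitAI | essay_agent/eval/conversation_quality_evaluator.py | _find_profile_keywords_in_responses
-- ===== SOURCE A (Python) =====
-- from typing import Any, Dict, List, Optional, Set, Tuple
--
-- def _find_profile_keywords_in_responses(ai_responses: List[str], profile_keywords: List[str]) -> List[str]:
--     """Find which profile keywords appear in AI responses."""
--     found_keywords = []
--
--     for response in ai_responses:
--         response_lower = response.lower()
--         for keyword in profile_keywords:
--             if keyword.lower() in response_lower and keyword not in found_keywords:
--                 found_keywords.append(keyword)
--
--     return found_keywords
-- ===== SOURCE B (Python) =====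
-- from typing import List
--
--
-- def _find_profile_keywords_in_responses(ai_responses: List[str], profile_keywords: List[str]) -> List[str]:
--     """Find which profile keywords appear in AI responses."""
--     remaining = list(dict.fromkeys(profile_keywords))
--     found = []
--     for response in ai_responses:
--         if not remaining:
--             break
--         response_lower = response.lower()
--         still = []
--         for keyword in remaining:
--             if keyword.lower() in response_lower:
--                 found.append(keyword)
--             else:
--                 still.append(keyword)
--         remaining = still
--     return found
-- ===== Notes on version B (the rewrite author's own statement) =====
-- stated objective: alternative
-- what changed: B dedups the keywords once up front and then maintains the shrinking list of not-yet-found keywords (partitioning it per response, breaking early when empty), instead of A's rescan of every keyword against the growing found-list for every response.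
import Mathlib
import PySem

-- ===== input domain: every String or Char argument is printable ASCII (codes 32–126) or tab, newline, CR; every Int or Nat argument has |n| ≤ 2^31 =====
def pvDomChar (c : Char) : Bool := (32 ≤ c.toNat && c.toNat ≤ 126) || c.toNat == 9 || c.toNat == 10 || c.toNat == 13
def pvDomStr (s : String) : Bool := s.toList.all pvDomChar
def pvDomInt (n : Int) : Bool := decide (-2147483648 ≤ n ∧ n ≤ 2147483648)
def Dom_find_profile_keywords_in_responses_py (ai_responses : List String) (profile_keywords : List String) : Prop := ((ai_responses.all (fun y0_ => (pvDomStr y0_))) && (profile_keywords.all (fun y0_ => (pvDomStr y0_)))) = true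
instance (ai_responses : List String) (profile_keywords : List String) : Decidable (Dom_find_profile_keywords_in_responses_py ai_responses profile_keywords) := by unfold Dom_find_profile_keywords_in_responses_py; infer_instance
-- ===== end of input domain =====

-- B dedups the keywords once and then keeps only the not-yet-found keywords between responses
-- (partitioning that shrinking list per response, stopping early when it is empty), instead of
-- A's rescan of every keyword against the growing found-list for every response.

-- ===== PORT A =====
def find_profile_keywords_in_responses_py (ai_responses : List String) (profile_keywords : List String) : List String :=
  ai_responses.foldl (fun found_keywords response =>
    let response_lower := PySem.Str.lower response
    profile_keywords.foldl (fun found_keywords keyword =>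
      if PySem.Str.isIn (PySem.Str.lower keyword) response_lower && !(found_keywords.contains keyword) then
        found_keywords ++ [keyword]
      else
        found_keywords) found_keywords) []

-- ===== PORT B =====
-- the inner 'for keyword in remaining' loop of Source B: appends hits to found, misses to still
def pvAltScan (response_lower : String) (remaining : List String) (found : List String) :
    List String × List String :=
  remaining.foldl (fun st keyword =>
    if PySem.Str.isIn (PySem.Str.lower keyword) response_lower then
      (st.1 ++ [keyword], st.2)
    else
      (st.1, st.2 ++ [keyword])) (found, [])

-- the outer 'for response in ai_responses' loop of Source B, with its early 'break'
def pvAltGo : List String → List String → List String → List String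
  | [], found, _ => found
  | response :: rest, found, remaining =>
    if remaining.isEmpty then found
    else
      let st := pvAltScan (PySem.Str.lower response) remaining found
      pvAltGo rest st.1 st.2

def find_profile_keywords_in_responses_py_alt (ai_responses : List String) (profile_keywords : List String) : List String :=
  pvAltGo ai_responses [] (PySem.List.dedup profile_keywords)

-- ===== PRECONDITION & SPEC =====
def Spec_find_profile_keywords_in_responses_py (ai_responses : List String) (profile_keywords : List String) (out : List String) : Prop := out = find_profile_keywords_in_responses_py_alt ai_responses profile_keywords
instance (ai_responses : List String) (profile_keywords : List String) (out : List String) : Decidable (Spec_find_profile_keywords_in_responses_py ai_responses profile_keywords out) := by unfold Spec_find_profile_keywords_in_responses_py; infer_instance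

-- ===== CLAIM (what is proved, stated in full; the proofs are below) =====
def Claim_equal_find_profile_keywords_in_responses_py : Prop := ∀ (ai_responses : List String) (profile_keywords : List String), Dom_find_profile_keywords_in_responses_py ai_responses profile_keywords → Spec_find_profile_keywords_in_responses_py ai_responses profile_keywords (find_profile_keywords_in_responses_py ai_responses profile_keywords)

-- ===== LEMMAS AND PROOFS =====

-- folding Set.add from an arbitrary accumulator = the accumulator ++ the new distinct elements
theorem pv_setAcc (xs acc : List String) :
    xs.foldl PySem.Set.add acc
      = acc ++ (PySem.Set.ofList xs).filter (fun y => !(acc.contains y)) := by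
  induction xs generalizing acc with
  | nil => simp [PySem.Set.ofList]
  | cons x t ih =>
    have hx : PySem.Set.ofList (x :: t)
        = [x] ++ (PySem.Set.ofList t).filter (fun y => !(([x] : List String).contains y)) := by
      have h1 : PySem.Set.ofList (x :: t) = t.foldl PySem.Set.add [x] := by
        simp [PySem.Set.ofList, PySem.Set.add, PySem.Set.contains]
      rw [h1, ih]
    rw [List.foldl_cons, ih, hx]
    by_cases hc : x ∈ acc
    · have hadd : PySem.Set.add acc x = acc := by
        simp [PySem.Set.add, PySem.Set.contains, hc]
      rw [hadd]
      simp only [List.filter_append, List.filter_filter]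
      congr 1
      have hx0 : List.filter (fun y => !acc.contains y) [x] = [] := by simp [hc]
      rw [hx0, List.nil_append]
      apply List.filter_congr
      intro y _
      by_cases hyx : y = x
      · subst hyx; simp [hc]
      · simp [hyx]
    · have hadd : PySem.Set.add acc x = acc ++ [x] := by
        simp [PySem.Set.add, PySem.Set.contains, hc]
      rw [hadd]
      simp only [List.filter_append, List.filter_filter, List.append_assoc]
      congr 1
      simp [hc]

-- Set.ofList peeled at the head
theorem pv_ofList_cons (x : String) (t : List String) :
    PySem.Set.ofList (x :: t)
      = [x] ++ (PySem.Set.ofList t).filter (fun y => !(([x] : List String).contains y)) := by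
  have h1 : PySem.Set.ofList (x :: t) = t.foldl PySem.Set.add [x] := by
    simp [PySem.Set.ofList, PySem.Set.add, PySem.Set.contains]
  rw [h1, pv_setAcc]

-- A's inner loop over all keywords, from state `found`: appends the not-yet-found hits,
-- one per distinct keyword, in first-occurrence order
theorem pv_innerEq (p : String → Bool) (ks found : List String) :
    ks.foldl (fun f kw => if p kw && !(f.contains kw) then f ++ [kw] else f) found
      = found ++ ((PySem.Set.ofList ks).filter (fun k => !(found.contains k))).filter p := by
  induction ks generalizing found with
  | nil => simp [PySem.Set.ofList]
  | cons kw t ih =>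
    rw [List.foldl_cons, pv_ofList_cons]
    by_cases hmem : kw ∈ found
    · have hstep : (if p kw && !(found.contains kw) then found ++ [kw] else found) = found := by
        simp [hmem]
      rw [hstep, ih]
      simp only [List.filter_append, List.filter_filter]
      congr 1
      have h0 : List.filter (fun a => p a && !found.contains a) [kw] = [] := by simp [hmem]
      rw [h0, List.nil_append]
      apply List.filter_congr
      intro y _
      by_cases hyx : y = kw
      · subst hyx; simp [hmem]
      · simp [hyx]
    · by_cases hp : p kw = true
      · have hstep : (if p kw && !(found.contains kw) then found ++ [kw] else found)
            = found ++ [kw] := by simp [hmem, hp]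
        rw [hstep, ih]
        simp only [List.filter_append, List.filter_filter, List.append_assoc]
        congr 1
        simp only [List.filter_cons, List.filter_nil]
        have : (!found.contains kw) = true := by simp [hmem]
        simp only [this, hp]
        congr 1
        apply List.filter_congr
        intro y _
        by_cases hyx : y = kw
        · subst hyx; simp
        · simp [hyx]
      · have hstep : (if p kw && !(found.contains kw) then found ++ [kw] else found) = found := by
          simp [hp]
        rw [hstep, ih]
        simp only [List.filter_append, List.filter_filter]
        congr 1
        have h0 : List.filter (fun a => p a && !found.contains a) [kw] = [] := by simp [hp]
        rw [h0, List.nil_append]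
        apply List.filter_congr
        intro y _
        by_cases hyx : y = kw
        · subst hyx; simp [hp]
        · simp [hyx]

-- B's per-response scan partitions `remaining` (generalized second accumulator)
theorem pv_scanAux (p : String → Bool) (rem f s : List String) :
    rem.foldl (fun st keyword =>
      if p keyword then (st.1 ++ [keyword], st.2) else (st.1, st.2 ++ [keyword])) (f, s)
      = (f ++ rem.filter p, s ++ rem.filter (fun kw => !p kw)) := by
  induction rem generalizing f s with
  | nil => simp
  | cons kw t ih =>
    by_cases h : p kw = true
    · simp [h, ih]
    · simp [h, ih]

theorem pv_scanEq (rl : String) (rem found : List String) :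
    pvAltScan rl rem found
      = (found ++ rem.filter (fun kw => PySem.Str.isIn (PySem.Str.lower kw) rl),
         rem.filter (fun kw => !PySem.Str.isIn (PySem.Str.lower kw) rl)) := by
  rw [pvAltScan, pv_scanAux]
  simp

-- the remaining-list invariant survives one response
theorem pv_remStep (p : String → Bool) (ks found : List String) :
    (PySem.Set.ofList ks).filter
        (fun k => !((found ++ ((PySem.Set.ofList ks).filter (fun k => !(found.contains k))).filter p).contains k))
      = ((PySem.Set.ofList ks).filter (fun k => !(found.contains k))).filter (fun k => !p k) := by
  simp only [List.filter_filter]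
  apply List.filter_congr
  intro k hk
  have hk' : k ∈ ks := by simpa using hk
  by_cases hf : k ∈ found
  · simp [hf]
  · by_cases hp : p k = true
    · simp [List.mem_filter, hf, hp, hk']
    · simp [List.mem_filter, hf, hp]

-- once every keyword is found, A's remaining iterations change nothing
theorem pv_fixLem (ks rs found : List String)
    (h : (PySem.Set.ofList ks).filter (fun k => !(found.contains k)) = []) :
    rs.foldl (fun found_keywords response =>
        ks.foldl (fun f kw =>
          if PySem.Str.isIn (PySem.Str.lower kw) (PySem.Str.lower response) && !(f.contains kw)
          then f ++ [kw] else f) found_keywords) found = found := by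
  induction rs with
  | nil => rfl
  | cons r rest ih =>
    rw [List.foldl_cons,
        pv_innerEq (fun kw => PySem.Str.isIn (PySem.Str.lower kw) (PySem.Str.lower r)) ks found,
        h]
    simpa using ih

-- main invariant: B's loop, with `remaining` = the distinct keywords not yet in `found`,
-- computes A's loop
theorem pv_mainLem (ks rs found : List String) :
    pvAltGo rs found ((PySem.Set.ofList ks).filter (fun k => !(found.contains k)))
      = rs.foldl (fun found_keywords response =>
          ks.foldl (fun f kw =>
            if PySem.Str.isIn (PySem.Str.lower kw) (PySem.Str.lower response) && !(f.contains kw)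
            then f ++ [kw] else f) found_keywords) found := by
  induction rs generalizing found with
  | nil => rfl
  | cons r rest ih =>
    rw [List.foldl_cons,
        pv_innerEq (fun kw => PySem.Str.isIn (PySem.Str.lower kw) (PySem.Str.lower r)) ks found]
    by_cases he : ((PySem.Set.ofList ks).filter (fun k => !(found.contains k))).isEmpty = true
    · have h : (PySem.Set.ofList ks).filter (fun k => !(found.contains k)) = [] := by
        simpa [List.isEmpty_iff] using he
      rw [show pvAltGo (r :: rest) found ((PySem.Set.ofList ks).filter (fun k => !(found.contains k))) = found
            from by rw [pvAltGo, if_pos he], h]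
      simp only [List.filter_nil, List.append_nil]
      exact (pv_fixLem ks rest found h).symm
    · rw [show pvAltGo (r :: rest) found ((PySem.Set.ofList ks).filter (fun k => !(found.contains k)))
            = pvAltGo rest
                (pvAltScan (PySem.Str.lower r) ((PySem.Set.ofList ks).filter (fun k => !(found.contains k))) found).1
                (pvAltScan (PySem.Str.lower r) ((PySem.Set.ofList ks).filter (fun k => !(found.contains k))) found).2
            from by rw [pvAltGo, if_neg he],
          pv_scanEq]
      rw [← pv_remStep (fun kw => PySem.Str.isIn (PySem.Str.lower kw) (PySem.Str.lower r)) ks found]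
      exact ih (found ++ _)

-- ===== VERDICT (by name: the statement is the Claim_ definition above) =====
theorem find_profile_keywords_in_responses_py_spec : Claim_equal_find_profile_keywords_in_responses_py := by
  intro rs ks _
  unfold Spec_find_profile_keywords_in_responses_py
  unfold find_profile_keywords_in_responses_py find_profile_keywords_in_responses_py_alt
  have h0 : (PySem.List.dedup ks : List String)
      = (PySem.Set.ofList ks).filter (fun k => !(([] : List String).contains k)) := by
    simp [PySem.List.dedup]
  rw [h0, pv_mainLem ks rs []]
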